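-- pv_equiv track=rewrite | github.com/loveCanopy/Scala-Spark | spark-mllib/movie/DateTime.py | assign_tod
-- ===== SOURCE A (Python) =====
-- def assign_tod(hr):
--     times_of_day={
--         'moring':range(7,12),
--         'lunch':range(12,14),
--         'afternon':range(14,18),
--         "evening":range(18,23),
--         "night":[23,24,1,2,3,4,5,6]
--     }
--     for k,v in times_of_day.items():
--         if hr in v:
--             return k
-- ===== SOURCE B (Python) =====
-- def assign_tod(hr):
--     hour_to_label = {h: 'moring' for h in range(7, 12)}
--     hour_to_label.update({h: 'lunch' for h in range(12, 14)})
--     hour_to_label.update({h: 'afternon' for h in range(14, 18)})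
--     hour_to_label.update({h: 'evening' for h in range(18, 23)})
--     hour_to_label.update({h: 'night' for h in [23, 24, 1, 2, 3, 4, 5, 6]})
--     return hour_to_label.get(hr)
-- ===== Notes on version B (the rewrite author's own statement) =====
-- stated objective: idiomatic
-- what changed: Replaces the loop that scans five hour ranges with an inverted hour-to-label dict built once, so the answer is a single keyed lookup.
import Mathlib
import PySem

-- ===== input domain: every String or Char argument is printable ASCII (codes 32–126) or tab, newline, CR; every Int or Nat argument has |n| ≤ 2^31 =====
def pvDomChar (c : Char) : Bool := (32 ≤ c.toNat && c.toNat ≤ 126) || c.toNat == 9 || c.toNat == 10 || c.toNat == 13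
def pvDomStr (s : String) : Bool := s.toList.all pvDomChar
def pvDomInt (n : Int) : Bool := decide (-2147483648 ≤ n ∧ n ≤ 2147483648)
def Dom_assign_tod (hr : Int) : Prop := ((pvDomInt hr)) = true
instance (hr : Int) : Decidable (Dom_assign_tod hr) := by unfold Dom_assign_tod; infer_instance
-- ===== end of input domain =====

-- B replaces A's loop over five labelled ranges with an inverted hour->label dict built once and a single keyed lookup (idiomatic).
-- ===== PORT A =====
-- loop over times_of_day.items(): 'hr in range(a,b)' is a ≤ hr < b, 'hr in [..]' is list membership
def assign_tod (hr : Int) : Option String :=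
  if hr ∈ PySem.List.pyRange 7 12 1 then some "moring"
  else if hr ∈ PySem.List.pyRange 12 14 1 then some "lunch"
  else if hr ∈ PySem.List.pyRange 14 18 1 then some "afternon"
  else if hr ∈ PySem.List.pyRange 18 23 1 then some "evening"
  else if hr ∈ ([23, 24, 1, 2, 3, 4, 5, 6] : List Int) then some "night"
  else none

-- ===== PORT B =====
def assign_tod_alt (hr : Int) : Option String :=
  let d := (PySem.List.pyRange 7 12 1).foldl (fun d h => d.insert h "moring") PySem.Dict.empty
  let d := (PySem.List.pyRange 12 14 1).foldl (fun d h => d.insert h "lunch") d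
  let d := (PySem.List.pyRange 14 18 1).foldl (fun d h => d.insert h "afternon") d
  let d := (PySem.List.pyRange 18 23 1).foldl (fun d h => d.insert h "evening") d
  let d := ([23, 24, 1, 2, 3, 4, 5, 6] : List Int).foldl (fun d h => d.insert h "night") d
  d.get? hr

-- ===== PRECONDITION & SPEC =====
def Spec_assign_tod (hr : Int) (out : Option String) : Prop := out = assign_tod_alt hr
instance (hr : Int) (out : Option String) : Decidable (Spec_assign_tod hr out) := by unfold Spec_assign_tod; infer_instance

-- ===== CLAIM (what is proved, stated in full; the proofs are below) =====
def Claim_equal_assign_tod : Prop := ∀ (hr : Int), Dom_assign_tod hr → Spec_assign_tod hr (assign_tod hr)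

-- ===== LEMMAS AND PROOFS =====

-- ===== VERDICT (by name: the statement is the Claim_ definition above) =====
theorem alt_eval (hr : Int) : assign_tod_alt hr =
    (PySem.Dict.mk [(7, "moring"), (8, "moring"), (9, "moring"), (10, "moring"), (11, "moring"),
      (12, "lunch"), (13, "lunch"), (14, "afternon"), (15, "afternon"), (16, "afternon"), (17, "afternon"),
      (18, "evening"), (19, "evening"), (20, "evening"), (21, "evening"), (22, "evening"),
      (23, "night"), (24, "night"), (1, "night"), (2, "night"), (3, "night"), (4, "night"), (5, "night"), (6, "night")]).get? hr := rfl

set_option maxHeartbeats 1600000 in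
theorem assign_tod_spec : Claim_equal_assign_tod := by
  intro hr _
  unfold Spec_assign_tod
  by_cases h : 1 ≤ hr ∧ hr ≤ 24
  · obtain ⟨h1, h2⟩ := h
    interval_cases hr <;> (rw [alt_eval]; decide)
  · have hA : assign_tod hr = none := by
      unfold assign_tod
      simp only [PySem.List.mem_pyRange_one, List.mem_cons, List.not_mem_nil, or_false]
      split_ifs <;> first | rfl | omega
    have hB : assign_tod_alt hr = none := by
      rw [alt_eval, PySem.Dict.get?_eq_none_iff_not_mem_keys]
      simp only [PySem.Dict.keys_mk, List.map_cons, List.map_nil, List.mem_cons, List.not_mem_nil, or_false]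
      omega
    rw [hA, hB]
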